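-- pv_equiv track=rewrite | github.com/grigorysvech/TestFntastic | Task1/TestFntastic.py | convert
-- ===== SOURCE A (Python) =====
-- def convert(string):
--     string = string.lower()
--     repeats = dict()
--     for i in string:
--         if i in repeats.keys():
--             repeats[i] += 1
--         else:
--             repeats[i] = 1
--
--     result = ""
--     for i in string:
--         if repeats[i] > 1:
--             result += ")"
--         else:
--             result += "("
--     return result
-- ===== SOURCE B (Python) =====
-- def convert(string):
--     s = string.lower()
--     t = sorted(s)
--     dups = {a for a, b in zip(t, t[1:]) if a == b}
--     return ''.join(')' if c in dups else '(' for c in s)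
-- ===== Notes on version B (the rewrite author's own statement) =====
-- stated objective: alternative
-- what changed: A builds a per-character frequency dictionary in one loop and thresholds it in a second; B never counts anything: it sorts the lowered string and detects repeated characters as equal adjacent pairs in the sorted order (sort-then-scan duplicate detection), then maps membership in that duplicate set.
import Mathlib
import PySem

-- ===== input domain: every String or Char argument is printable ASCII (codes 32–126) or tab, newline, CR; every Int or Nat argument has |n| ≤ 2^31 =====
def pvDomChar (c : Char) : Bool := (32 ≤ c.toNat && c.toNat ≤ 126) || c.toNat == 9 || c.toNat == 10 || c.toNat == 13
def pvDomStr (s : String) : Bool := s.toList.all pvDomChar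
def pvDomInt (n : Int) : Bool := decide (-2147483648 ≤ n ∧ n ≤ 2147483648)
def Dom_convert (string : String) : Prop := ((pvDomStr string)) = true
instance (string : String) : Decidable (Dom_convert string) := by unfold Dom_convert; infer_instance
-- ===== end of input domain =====

-- B replaces A's frequency-dictionary count with sort-then-scan duplicate detection (alternative algorithm, not faster).

-- ===== PORT A =====
-- A: first loop builds the dict `repeats`; second loop appends ')' or '(' per character.
def convert (string : String) : String :=
  let s := (PySem.Str.lower string).toList
  let repeats : PySem.Dict Char Int :=
    s.foldl (fun d i =>
      if d.contains i then d.insert i (d.getD i 0 + 1) else d.insert i 1) PySem.Dict.empty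
  let result : List Char :=
    s.foldl (fun r i => r ++ [if repeats.getD i 0 > 1 then ')' else '(']) []
  String.ofList result

-- ===== PORT B =====
-- B: t = sorted(s); dups = {a for a, b in zip(t, t[1:]) if a == b}; join over membership in dups.
def convert_alt (string : String) : String :=
  let s := (PySem.Str.lower string).toList
  let t := PySem.List.sorted s (fun x => x) false
  let dups : PySem.Set Char :=
    PySem.Set.ofList
      (((t.zip (PySem.List.slice t (some 1) none)).filter (fun p => p.1 == p.2)).map Prod.fst)
  String.ofList (s.map (fun c => if PySem.Set.contains dups c then ')' else '('))

-- ===== PRECONDITION & SPEC =====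
def Spec_convert (string : String) (out : String) : Prop := out = convert_alt string
instance (string : String) (out : String) : Decidable (Spec_convert string out) := by unfold Spec_convert; infer_instance

-- ===== CLAIM (what is proved, stated in full; the proofs are below) =====
def Claim_equal_convert : Prop := ∀ (string : String), Dom_convert string → Spec_convert string (convert string)

-- ===== LEMMAS AND PROOFS =====

-- Python 'c in {…}' on a set built from a list is list membership.
lemma set_contains_ofList {α : Type} [DecidableEq α] (xs : List α) (c : α) :
    PySem.Set.contains (PySem.Set.ofList xs) c = true ↔ c ∈ xs := by
  simp [PySem.Set.contains, PySem.Set.mem_ofList]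

-- A's branching update coincides pointwise with the branchless counting insert.
lemma convert_step_eq (d : PySem.Dict Char Int) (i : Char) :
    (if d.contains i then d.insert i (d.getD i 0 + 1) else d.insert i 1)
      = d.insert i (d.getD i 0 + 1) := by
  by_cases h : d.contains i = true
  · simp [h]
  · simp only [Bool.not_eq_true] at h
    rw [PySem.Dict.getD_of_not_contains (d := d) (k := i) (d0 := (0:Int)) h]
    simp [h]

lemma convert_repeats_getD (s : List Char) (c : Char) :
    (s.foldl (fun d i =>
        if d.contains i then d.insert i (d.getD i 0 + 1) else d.insert i 1)
      PySem.Dict.empty).getD c 0 = (s.count c : Int) := by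
  have hf : (fun (d : PySem.Dict Char Int) (i : Char) =>
      if d.contains i then d.insert i (d.getD i 0 + 1) else d.insert i 1)
      = fun d i => d.insert i (d.getD i 0 + 1) := by
    funext d i; exact convert_step_eq d i
  rw [hf, PySem.Dict.getD_foldl_insert_add_one]
  simp [PySem.Dict.getD_empty]

-- the first components of the equal adjacent pairs of t
def adjDups (t : List Char) : List Char :=
  ((t.zip t.tail).filter (fun p => p.1 == p.2)).map Prod.fst

lemma mem_adjDups_mem (t : List Char) (c : Char) (h : c ∈ adjDups t) : c ∈ t := by
  unfold adjDups at h
  obtain ⟨⟨x, y⟩, hp, rfl⟩ := List.mem_map.mp h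
  exact (List.of_mem_zip (List.mem_of_mem_filter hp)).1

-- on a sorted list, having an equal adjacent pair is the same as occurring at least twice
lemma mem_adjDups_iff (t : List Char) (hs : t.Pairwise (· ≤ ·)) (c : Char) :
    c ∈ adjDups t ↔ 2 ≤ t.count c := by
  induction t with
  | nil => simp [adjDups]
  | cons a t ih =>
    cases t with
    | nil =>
      by_cases h : a = c <;> simp [adjDups, h]
    | cons b r =>
      have hab : a ≤ b := (List.pairwise_cons.mp hs).1 b (by simp)
      have hrest : (b :: r).Pairwise (· ≤ ·) := (List.pairwise_cons.mp hs).2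
      have hIH := ih hrest
      have hunf : adjDups (a :: b :: r)
          = (if a == b then [a] else []) ++ adjDups (b :: r) := by
        by_cases h : a = b <;> simp [adjDups, h]
      rw [hunf]
      by_cases hc : c = a
      · subst hc
        by_cases h : c = b
        · subst h
          simp
        · have hlt : ∀ y ∈ b :: r, c < y := by
            intro y hy
            rcases List.mem_cons.mp hy with rfl | hy
            · exact lt_of_le_of_ne hab h
            · exact lt_of_lt_of_le (lt_of_le_of_ne hab h)
                ((List.pairwise_cons.mp hrest).1 y hy)
          have hnot : c ∉ (b :: r) := fun hmem => lt_irrefl c (hlt c hmem)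
          have hcnt : (b :: r).count c = 0 := List.count_eq_zero.mpr hnot
          have hnd : c ∉ adjDups (b :: r) := fun hd => hnot (mem_adjDups_mem _ _ hd)
          simp [h, hcnt, hnd]
      · have hac : a ≠ c := by intro h; exact hc h.symm
        have hcnt : (a :: b :: r).count c = (b :: r).count c := by
          simp [List.count_cons, hac]
        rw [hcnt, ← hIH]
        by_cases h : a = b
        · subst h
          simp [hc]
        · simp [h]

-- ===== VERDICT (by name: the statement is the Claim_ definition above) =====
theorem convert_spec : Claim_equal_convert := by
  intro string _
  unfold Spec_convert convert convert_alt
  simp only [convert_repeats_getD, PySem.List.foldl_append_singleton_eq_map,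
    PySem.List.slice_from_one]
  refine congrArg String.ofList (List.map_congr_left ?_)
  intro c _
  have hperm := PySem.List.sorted_perm (xs := (PySem.Str.lower string).toList)
    (key := fun x : Char => x) (rev := false)
  have hcount := hperm.count_eq c
  have hmem := mem_adjDups_iff (PySem.List.sorted (PySem.Str.lower string).toList (fun x => x) false)
    (PySem.List.sorted_pairwise _ _) c
  have hkey : c ∈ adjDups (PySem.List.sorted (PySem.Str.lower string).toList (fun x => x) false)
      ↔ 2 ≤ ((PySem.Str.lower string).toList).count c := by
    rw [hmem, hcount]
  by_cases hm : c ∈ adjDups (PySem.List.sorted (PySem.Str.lower string).toList (fun x => x) false)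
  · rw [if_pos, if_pos]
    · have hm' := hm
      simp only [adjDups] at hm'
      exact (set_contains_ofList _ c).mpr hm'
    · have := hkey.mp hm
      omega
  · rw [if_neg, if_neg]
    · have hm' := hm
      simp only [adjDups] at hm'
      exact fun h => hm' ((set_contains_ofList _ c).mp h)
    · have : ¬ 2 ≤ ((PySem.Str.lower string).toList).count c := fun h2 => hm (hkey.mpr h2)
      omega
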